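-- pv_equiv track=rewrite | github.com/serpiente/aoc-2023 | 7/part2.py | handrank
-- ===== SOURCE A (Python) =====
-- from collections import Counter
--
-- ranks = 'J23456789TQKA'
--
-- def handrank(hand):
--     hand_rnks = list(map(ranks.index , hand))
--     counts = Counter(hand_rnks)
--     j = counts[0]
--     del counts[0]
--     groups = sorted(((counts[r]) for r in counts), reverse=True)
--     if groups: #meh, hack to go around JJJJJ
--         groups[0] = groups[0] + j
--     else:
--         groups = [5]
--     return tuple(groups + hand_rnks)
-- ===== SOURCE B (Python) =====
-- from collections import Counter
--
-- ranks = 'J23456789TQKA'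
--
-- def handrank(hand):
--     hand_rnks = [ranks.index(c) for c in hand]
--     non_jokers = [r for r in hand_rnks if r != 0]
--     if non_jokers:
--         cnt = Counter(non_jokers)
--         best = max(cnt, key=lambda r: cnt[r])
--         fixed = [best if r == 0 else r for r in hand_rnks]
--         groups = sorted(Counter(fixed).values(), reverse=True)
--     else:
--         groups = [5]
--     return tuple(groups + hand_rnks)
-- ===== Notes on version B (the rewrite author's own statement) =====
-- stated objective: idiomatic
-- what changed: Instead of deleting the joker key from the Counter and patching the largest sorted group with groups[0] += j, B substitutes every joker with the most frequent non-joker card, recounts the modified hand and sorts the group sizes; the all-joker case falls out of the emptiness test instead of the [5] hack.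
import Mathlib
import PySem

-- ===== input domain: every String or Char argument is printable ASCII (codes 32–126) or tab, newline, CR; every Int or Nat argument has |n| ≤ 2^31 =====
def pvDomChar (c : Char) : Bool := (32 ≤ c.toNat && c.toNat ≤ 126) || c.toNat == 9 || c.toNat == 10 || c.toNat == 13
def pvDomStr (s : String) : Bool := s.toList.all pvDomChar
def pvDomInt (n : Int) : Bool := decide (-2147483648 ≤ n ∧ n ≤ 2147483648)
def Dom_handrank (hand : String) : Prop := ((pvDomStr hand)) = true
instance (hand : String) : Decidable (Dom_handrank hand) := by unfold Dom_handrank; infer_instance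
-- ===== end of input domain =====

-- B replaces A's del/groups[0]+=j Counter hack by the idiomatic joker substitution: rewrite every
-- joker as the most frequent non-joker card, recount, and sort the group sizes; same return value.


-- the module constant ranks; ranks.index(c) is PySem.Chars.find on the singleton string
-- (exact where c ∈ ranks; where c ∉ ranks Python raises ValueError — excluded by Pre_)
def ranksIndex (c : Char) : Int := PySem.Chars.find ("J23456789TQKA".toList) [c]

-- ===== PORT A =====
def handrank (hand : String) : List Int :=
  let hand_rnks := hand.toList.map ranksIndex
  let counts := PySem.Dict.counter hand_rnks
  let j := counts.getD 0 0
  let counts2 := counts.erase 0          -- del counts[0]  (Counter's del: no KeyError)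
  let groups := PySem.List.sorted (counts2.keys.map (fun r => counts2.getD r 0)) (fun x => x) true
  match groups with
  | [] => [5] ++ hand_rnks
  | g :: t => ((g + j) :: t) ++ hand_rnks

-- ===== PORT B =====
def handrank_alt (hand : String) : List Int :=
  let hand_rnks := hand.toList.map ranksIndex
  let non_jokers := hand_rnks.filter (fun r => decide (r ≠ 0))
  let groups :=
    if non_jokers.isEmpty then [5]
    else
      let cnt := PySem.Dict.counter non_jokers
      let best := (PySem.List.max? cnt.keys (fun r => cnt.getD r 0)).getD 0
      let fixed := hand_rnks.map (fun r => if r = 0 then best else r)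
      PySem.List.sorted (PySem.Dict.counter fixed).values (fun x => x) true
  groups ++ hand_rnks

-- ===== PRECONDITION & SPEC =====
-- Pre_ excludes exactly the hands containing a character that is not one of the thirteen
-- card ranks, on which A's ranks.index raises ValueError.
def Pre_handrank (hand : String) : Prop :=
  (hand.toList.all (fun c => ("J23456789TQKA".toList).contains c)) = true
instance (hand : String) : Decidable (Pre_handrank hand) := by unfold Pre_handrank; infer_instance
def pvWitness_handrank : String := "T55J5"

def Spec_handrank (hand : String) (out : List Int) : Prop := out = handrank_alt hand
instance (hand : String) (out : List Int) : Decidable (Spec_handrank hand out) := by unfold Spec_handrank; infer_instance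

-- ===== CLAIM (what is proved, stated in full; the proofs are below) =====
def Claim_equal_handrank : Prop := ∀ (hand : String), Dom_handrank hand → Pre_handrank hand → Spec_handrank hand (handrank hand)

-- ===== LEMMAS AND PROOFS =====

-- the groups part of each port, as a function of the list of rank indices
def Agroups (l : List Int) : List Int :=
  match PySem.List.sorted
      ((((PySem.Dict.counter l).erase 0).keys).map
        (fun r => ((PySem.Dict.counter l).erase 0).getD r 0)) (fun x => x) true with
  | [] => [5]
  | g :: t => (g + (PySem.Dict.counter l).getD 0 0) :: t

def Bgroups (l : List Int) : List Int :=
  if (l.filter (fun r => decide (r ≠ 0))).isEmpty then [5]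
  else
    PySem.List.sorted
      (PySem.Dict.counter (l.map (fun r => if r = 0 then
          (PySem.List.max? (PySem.Dict.counter (l.filter (fun r => decide (r ≠ 0)))).keys
            (fun r => (PySem.Dict.counter (l.filter (fun r => decide (r ≠ 0)))).getD r 0)).getD 0
        else r))).values (fun x => x) true

theorem match_append (e : List Int) (j : Int) (l : List Int) :
    (match e with | [] => [5] ++ l | g :: t => ((g + j) :: t) ++ l)
      = (match e with | [] => ([5] : List Int) | g :: t => (g + j) :: t) ++ l := by
  cases e <;> rfl

theorem handrank_eq_A (hand : String) :
    handrank hand = Agroups (hand.toList.map ranksIndex) ++ hand.toList.map ranksIndex :=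
  match_append _ _ _

theorem handrank_eq_B (hand : String) :
    handrank_alt hand = Bgroups (hand.toList.map ranksIndex) ++ hand.toList.map ranksIndex := rfl

-- sorted(·, reverse=True) with the identity key depends only on the multiset
theorem sortedDesc_perm_congr (xs ys : List Int) (h : xs.Perm ys) :
    PySem.List.sorted xs (fun x => x) true = PySem.List.sorted ys (fun x => x) true := by
  have hp : (PySem.List.sorted xs (fun x => x) true).Perm (PySem.List.sorted ys (fun x => x) true) :=
    ((PySem.List.sorted_perm xs _ true).trans h).trans (PySem.List.sorted_perm ys _ true).symm
  exact hp.eq_of_pairwise (fun a b _ _ hab hba => le_antisymm hba hab)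
    (PySem.List.sorted_pairwise_rev xs _) (PySem.List.sorted_pairwise_rev ys _)

-- counting after substituting jokers (0) by b
theorem count_subst (l : List Int) (b k : Int) (hb : b ≠ 0) (hk : k ≠ 0) :
    (l.map (fun r => if r = 0 then b else r)).count k
      = l.count k + (if k = b then l.count 0 else 0) := by
  induction l with
  | nil => simp
  | cons r t ih =>
    simp only [List.map_cons, List.count_cons, ih]
    by_cases hr : r = 0 <;> by_cases hkb : k = b <;>
      simp [hr, hkb, Ne.symm hk, Ne.symm hb] <;> omega

theorem mem_subst (l : List Int) (b : Int) (hb : b ∈ l) (hb0 : b ≠ 0) (k : Int) :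
    (k ∈ l.map (fun r => if r = 0 then b else r)) ↔ (k ∈ l ∧ k ≠ 0) := by
  constructor
  · intro hm
    rcases List.mem_map.mp hm with ⟨r, hrl, hrk⟩
    by_cases hr : r = 0
    · simp [hr] at hrk; exact hrk ▸ ⟨hb, hb0⟩
    · simp [hr] at hrk; exact hrk ▸ ⟨hrl, hr⟩
  · rintro ⟨hkl, hk0⟩
    exact List.mem_map.mpr ⟨k, hkl, by simp [hk0]⟩

theorem count_filter_ne (l : List Int) (y : Int) (hy : y ≠ 0) :
    (l.filter (fun r => decide (r ≠ 0))).count y = l.count y := by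
  induction l with
  | nil => simp
  | cons r t ih =>
    by_cases hr : r = 0 <;> simp [hr, List.count_cons, hy, Ne.symm hy]

theorem items_erase0 (l : List Int) :
    ((PySem.Dict.counter l).erase 0).items
      = ((PySem.Set.ofList l).filter (fun k => decide (k ≠ 0))).map
          (fun k => (k, (l.count k : Int))) := by
  simp only [PySem.Dict.erase, PySem.Dict.items_counter, List.filter_map, Function.comp_def]
  congr 1
  apply List.filter_congr
  intro x _
  by_cases hx : x = 0 <;> simp [hx]

theorem keys_erase0 (l : List Int) :
    ((PySem.Dict.counter l).erase 0).keys
      = (PySem.Set.ofList l).filter (fun k => decide (k ≠ 0)) := by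
  simp [PySem.Dict.keys, items_erase0, List.map_map, Function.comp_def]

theorem getD_erase0 (l : List Int) (r : Int)
    (hr : r ∈ (PySem.Set.ofList l).filter (fun k => decide (k ≠ 0))) :
    ((PySem.Dict.counter l).erase 0).getD r 0 = (l.count r : Int) := by
  apply PySem.Dict.getD_of_mem_items
  · rw [items_erase0]; exact List.mem_map_of_mem hr
  · rw [keys_erase0]
    exact (PySem.Set.nodup_ofList l).filter _

theorem groups_eq (l : List Int) : Agroups l = Bgroups l := by
  have hLA : (((PySem.Dict.counter l).erase 0).keys).map
        (fun r => ((PySem.Dict.counter l).erase 0).getD r 0)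
      = ((PySem.Set.ofList l).filter (fun k => decide (k ≠ 0))).map
          (fun r => (l.count r : Int)) := by
    rw [keys_erase0]
    exact List.map_congr_left (fun r hr => getD_erase0 l r hr)
  have hj : (PySem.Dict.counter l).getD 0 0 = (l.count 0 : Int) := by
    simp [PySem.Dict.getD_counter]
  set D0 := (PySem.Set.ofList l).filter (fun k => decide (k ≠ 0)) with hD0def
  have hmemD0 : ∀ k : Int, k ∈ D0 ↔ (k ∈ l ∧ k ≠ 0) := by
    intro k
    simp [hD0def, List.mem_filter, PySem.Set.mem_ofList]
  have hndD0 : D0.Nodup := (PySem.Set.nodup_ofList l).filter _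
  unfold Agroups Bgroups
  rw [hLA, hj]
  by_cases hf : l.filter (fun r => decide (r ≠ 0)) = []
  · -- all jokers (or empty hand): both sides are [5]
    have hD0nil : D0 = [] := by
      rw [List.eq_nil_iff_forall_not_mem]
      intro x hx
      rcases (hmemD0 x).mp hx with ⟨hxl, hx0⟩
      have hxf : x ∈ l.filter (fun r => decide (r ≠ 0)) :=
        List.mem_filter.mpr ⟨hxl, by simp [hx0]⟩
      rw [hf] at hxf
      simp at hxf
    rw [hD0nil, if_pos (by rw [hf]; rfl)]
    rfl
  · rw [if_neg (by rw [List.isEmpty_iff]; exact hf)]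
    obtain ⟨x, hx⟩ := List.exists_mem_of_ne_nil _ hf
    have hxk : x ∈ (PySem.Dict.counter (l.filter (fun r => decide (r ≠ 0)))).keys := by
      rw [PySem.Dict.keys_counter]
      simpa using hx
    rcases hmx : PySem.List.max? (PySem.Dict.counter (l.filter (fun r => decide (r ≠ 0)))).keys
        (fun r => (PySem.Dict.counter (l.filter (fun r => decide (r ≠ 0)))).getD r 0) with _ | b
    · exfalso
      rw [PySem.List.max?_eq_none_iff] at hmx
      rw [hmx] at hxk
      simp at hxk
    simp only [Option.getD_some]
    have hbk := PySem.List.max?_mem hmx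
    have hbnonj : b ∈ l.filter (fun r => decide (r ≠ 0)) := by
      rw [PySem.Dict.keys_counter] at hbk
      simpa [PySem.Set.mem_ofList] using hbk
    have hbl : b ∈ l := (List.mem_filter.mp hbnonj).1
    have hb0 : b ≠ 0 := by simpa using (List.mem_filter.mp hbnonj).2
    have hmax' : ∀ y ∈ l, y ≠ 0 → l.count y ≤ l.count b := by
      intro y hy hy0
      have hyk : y ∈ (PySem.Dict.counter (l.filter (fun r => decide (r ≠ 0)))).keys := by
        rw [PySem.Dict.keys_counter]
        simp only [PySem.Set.mem_ofList, List.mem_filter]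
        simp [hy, hy0]
      have h1 := PySem.List.max?_isMax hmx y hyk
      simp only [PySem.Dict.getD_counter] at h1
      rw [count_filter_ne l y hy0, count_filter_ne l b hb0] at h1
      exact_mod_cast h1
    have hbD0 : b ∈ D0 := (hmemD0 b).mpr ⟨hbl, hb0⟩
    obtain ⟨P, S, hPS⟩ := List.append_of_mem hbD0
    have hndPS : (P ++ b :: S).Nodup := hPS ▸ hndD0
    rcases List.nodup_append.mp hndPS with ⟨hndP, hndbS, hdisj⟩
    have hbP : b ∉ P := fun hbp => hdisj b hbp b (by simp) rfl
    have hbS : b ∉ S := (List.nodup_cons.mp hndbS).1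
    have hPmem : ∀ k ∈ P, k ∈ l ∧ k ≠ 0 ∧ k ≠ b := by
      intro k hk
      have hkD0 : k ∈ D0 := by rw [hPS]; exact List.mem_append_left _ hk
      rcases (hmemD0 k).mp hkD0 with ⟨h1, h2⟩
      exact ⟨h1, h2, fun h => hbP (h ▸ hk)⟩
    have hSmem : ∀ k ∈ S, k ∈ l ∧ k ≠ 0 ∧ k ≠ b := by
      intro k hk
      have hkD0 : k ∈ D0 := by rw [hPS]; exact List.mem_append_right _ (by simp [hk])
      rcases (hmemD0 k).mp hkD0 with ⟨h1, h2⟩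
      exact ⟨h1, h2, fun h => hbS (h ▸ hk)⟩
    have hvals : (PySem.Dict.counter (l.map (fun r => if r = 0 then b else r))).values
        = (PySem.Set.ofList (l.map (fun r => if r = 0 then b else r))).map
            (fun k => ((l.map (fun r => if r = 0 then b else r)).count k : Int)) := by
      simp [PySem.Dict.values, PySem.Dict.items_counter, List.map_map, Function.comp_def]
    have hpermD : (PySem.Set.ofList (l.map (fun r => if r = 0 then b else r))).Perm D0 := by
      rw [List.perm_ext_iff_of_nodup (PySem.Set.nodup_ofList _) hndD0]
      intro k
      rw [PySem.Set.mem_ofList, mem_subst l b hbl hb0 k, hmemD0 k]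
    have hcntb : (((l.map (fun r => if r = 0 then b else r)).count b : Int))
        = (l.count b : Int) + (l.count 0 : Int) := by
      rw [count_subst l b b hb0 hb0]
      simp
    have hmapB : D0.map (fun k => ((l.map (fun r => if r = 0 then b else r)).count k : Int))
        = P.map (fun r => (l.count r : Int))
            ++ (((l.count b : Int) + (l.count 0 : Int)) :: S.map (fun r => (l.count r : Int))) := by
      rw [hPS]
      simp only [List.map_append, List.map_cons]
      congr 1
      · refine List.map_congr_left (fun k hk => ?_)
        rcases hPmem k hk with ⟨_, hk0, hkb⟩
        rw [count_subst l b k hb0 hk0]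
        simp [hkb]
      · refine congrArg₂ (· :: ·) hcntb (List.map_congr_left (fun k hk => ?_))
        rcases hSmem k hk with ⟨_, hk0, hkb⟩
        rw [count_subst l b k hb0 hk0]
        simp [hkb]
    cases hs : PySem.List.sorted (D0.map (fun r => (l.count r : Int))) (fun x => x) true with
    | nil =>
      exfalso
      rw [PySem.List.sorted_eq_nil_iff] at hs
      have hbm : (l.count b : Int) ∈ D0.map (fun r => (l.count r : Int)) :=
        List.mem_map_of_mem hbD0
      rw [hs] at hbm
      simp at hbm
    | cons m t =>
      have hperm_sorted := PySem.List.sorted_perm (D0.map (fun r => (l.count r : Int)))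
        (fun x => x) true
      rw [hs] at hperm_sorted
      have hmmem : m ∈ D0.map (fun r => (l.count r : Int)) :=
        hperm_sorted.mem_iff.mp (by simp)
      have hpw := PySem.List.sorted_pairwise_rev (D0.map (fun r => (l.count r : Int))) (fun x => x)
      rw [hs] at hpw
      rcases List.pairwise_cons.mp hpw with ⟨hmt, htp⟩
      have hble : ∀ y ∈ D0.map (fun r => (l.count r : Int)), y ≤ m := by
        intro y hy
        rcases List.mem_cons.mp (hperm_sorted.mem_iff.mpr hy) with h | h
        · exact h ▸ le_refl m
        · exact hmt y h
      have hfble : (l.count b : Int) ≤ m := hble _ (List.mem_map_of_mem hbD0)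
      have hmle : m ≤ (l.count b : Int) := by
        rcases List.mem_map.mp hmmem with ⟨k, hk, rfl⟩
        rcases (hmemD0 k).mp hk with ⟨h1, h2⟩
        exact_mod_cast hmax' k h1 h2
      have hm : m = (l.count b : Int) := le_antisymm hmle hfble
      have hmapA : D0.map (fun r => (l.count r : Int))
          = P.map (fun r => (l.count r : Int))
              ++ (l.count b : Int) :: S.map (fun r => (l.count r : Int)) := by
        rw [hPS]
        simp
      have h2 : (m :: t).Perm ((l.count b : Int)
          :: (P.map (fun r => (l.count r : Int)) ++ S.map (fun r => (l.count r : Int)))) := by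
        refine hperm_sorted.trans ?_
        rw [hmapA]
        exact List.perm_middle
      rw [← hm] at h2
      have ht : t.Perm (P.map (fun r => (l.count r : Int)) ++ S.map (fun r => (l.count r : Int))) :=
        h2.cons_inv
      have hpermB : (PySem.Dict.counter (l.map (fun r => if r = 0 then b else r))).values.Perm
          ((m + (l.count 0 : Int)) :: t) := by
        rw [hvals]
        refine (hpermD.map _).trans ?_
        rw [hmapB]
        refine List.perm_middle.trans ?_
        rw [hm]
        exact ht.symm.cons _
      have hsortB : PySem.List.sorted ((m + (l.count 0 : Int)) :: t) (fun x => x) true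
          = (m + (l.count 0 : Int)) :: t := by
        apply PySem.List.sorted_rev_eq_self_of_pairwise
        refine List.pairwise_cons.mpr ⟨fun y hy => ?_, htp⟩
        have h3 := hmt y hy
        have h4 : (0 : Int) ≤ (l.count 0 : Int) := Int.natCast_nonneg _
        omega
      rw [sortedDesc_perm_congr _ _ hpermB, hsortB]

-- ===== VERDICT (by name: the statement is the Claim_ definition above) =====
theorem handrank_spec : Claim_equal_handrank := by
  intro hand _ _
  unfold Spec_handrank
  rw [handrank_eq_A, handrank_eq_B, groups_eq]
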